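-- pv_equiv track=rewrite | github.com/wangzhong-cn/EasyXT_KLC | code_converter/converters/jq_to_ptrade.py | _clean_duplicate_content
-- ===== SOURCE A (Python) =====
-- def _clean_duplicate_content(code: str) -> str:
--     """
--     清理重复内容
--
--     Args:
--         code: 代码
--
--     Returns:
--         str: 清理后的代码
--     """
--     lines = code.split('\n')
--     cleaned_lines = []
--     seen_lines = set()
--
--     for line in lines:
--         # 跳过空行的重复检查
--         if line.strip() == '':
--             cleaned_lines.append(line)
--             continue
--
--         # 如果是函数定义行，重置seen_lines
--         if line.startswith('def '):
--             seen_lines = set()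
--             cleaned_lines.append(line)
--             seen_lines.add(line.strip())
--             continue
--
--         # 如果是注释行，允许重复
--         if line.strip().startswith('#'):
--             cleaned_lines.append(line)
--             continue
--
--         # 检查是否已经见过这一行
--         if line.strip() not in seen_lines:
--             cleaned_lines.append(line)
--             seen_lines.add(line.strip())
--
--     return '\n'.join(cleaned_lines)
-- ===== SOURCE B (Python) =====
-- def _clean_duplicate_content(code: str) -> str:
--     # Group-then-dedup: split the lines into blocks at each 'def ' line,
--     # then deduplicate each block independently with a fresh seen-set.
--     lines = code.split('\n')
--     blocks = []
--     cur = []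
--     for line in lines:
--         if line.startswith('def '):
--             blocks.append(cur)
--             cur = [line]
--         else:
--             cur.append(line)
--     blocks.append(cur)
--
--     out = []
--     for block in blocks:
--         if block and block[0].startswith('def '):
--             out.append(block[0])
--             seen = {block[0].strip()}
--             rest = block[1:]
--         else:
--             seen = set()
--             rest = block
--         for line in rest:
--             s = line.strip()
--             if s == '' or s.startswith('#'):
--                 out.append(line)
--             elif s not in seen:
--                 out.append(line)
--                 seen.add(s)
--     return '\n'.join(out)
-- ===== Notes on version B (the rewrite author's own statement) =====
-- stated objective: alternative
-- what changed: Replaces the single stateful pass whose seen-set is reset in-loop at each 'def ' line by an explicit group-then-dedup decomposition: the lines are first split into blocks at 'def ' lines, then each block is deduplicated independently with its own fresh seen-set (the def head seeding it), and the block outputs are concatenated.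
import Mathlib
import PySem

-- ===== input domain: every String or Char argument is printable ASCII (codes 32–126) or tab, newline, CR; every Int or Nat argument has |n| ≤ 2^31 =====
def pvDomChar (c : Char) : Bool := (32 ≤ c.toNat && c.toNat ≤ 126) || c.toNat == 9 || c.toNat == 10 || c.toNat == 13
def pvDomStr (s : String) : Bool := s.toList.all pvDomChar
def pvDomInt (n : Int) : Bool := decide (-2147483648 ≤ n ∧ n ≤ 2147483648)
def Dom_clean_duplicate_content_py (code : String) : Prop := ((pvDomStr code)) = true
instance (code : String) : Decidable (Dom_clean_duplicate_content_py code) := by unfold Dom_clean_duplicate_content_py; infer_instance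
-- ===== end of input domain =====

-- B replaces A's single pass with an in-loop seen-set reset by a group-then-dedup-per-block
-- decomposition (alternative structure, same cost); return values proved equal on all inputs.

-- ===== PORT A =====
-- A's loop body, one line at a time over the state (cleaned_lines, seen_lines)
def cdcStepA (st : List String × PySem.Set String) (line : String) :
    List String × PySem.Set String :=
  if PySem.Str.strip line = "" then (st.1 ++ [line], st.2)
  else if PySem.Str.startswith line "def " then
    (st.1 ++ [line], PySem.Set.add PySem.Set.empty (PySem.Str.strip line))
  else if PySem.Str.startswith (PySem.Str.strip line) "#" then (st.1 ++ [line], st.2)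
  else if PySem.Set.contains st.2 (PySem.Str.strip line) then st
  else (st.1 ++ [line], PySem.Set.add st.2 (PySem.Str.strip line))

def clean_duplicate_content_py (code : String) : String :=
  PySem.Str.join "\n"
    (List.foldl cdcStepA ([], PySem.Set.empty) ((PySem.Str.split? code "\n").getD [])).1

-- ===== PORT B =====
-- B's first loop: split the lines into blocks at each 'def ' line
def cdcSplitStep (st : List (List String) × List String) (line : String) :
    List (List String) × List String :=
  if PySem.Str.startswith line "def " then (st.1 ++ [st.2], [line])
  else (st.1, st.2 ++ [line])

-- B's inner loop body over (out, seen)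
def cdcStepInner (st : List String × PySem.Set String) (line : String) :
    List String × PySem.Set String :=
  if PySem.Str.strip line = "" || PySem.Str.startswith (PySem.Str.strip line) "#" then
    (st.1 ++ [line], st.2)
  else if PySem.Set.contains st.2 (PySem.Str.strip line) then st
  else (st.1 ++ [line], PySem.Set.add st.2 (PySem.Str.strip line))

-- B's per-block processing: seed the seen-set from a 'def ' head, then dedup the rest
def cdcProcessBlock (out : List String) (block : List String) : List String :=
  match block with
  | [] => (List.foldl cdcStepInner (out, PySem.Set.empty) ([] : List String)).1
  | b0 :: rest =>
    if PySem.Str.startswith b0 "def " then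
      (List.foldl cdcStepInner (out ++ [b0], PySem.Set.ofList [PySem.Str.strip b0]) rest).1
    else
      (List.foldl cdcStepInner (out, PySem.Set.empty) (b0 :: rest)).1

def clean_duplicate_content_py_alt (code : String) : String :=
  PySem.Str.join "\n"
    (List.foldl cdcProcessBlock []
      ((List.foldl cdcSplitStep (([], []) : List (List String) × List String)
          ((PySem.Str.split? code "\n").getD [])).1 ++
       [(List.foldl cdcSplitStep (([], []) : List (List String) × List String)
          ((PySem.Str.split? code "\n").getD [])).2]))

-- ===== PRECONDITION & SPEC =====
def Spec_clean_duplicate_content_py (code : String) (out : String) : Prop := out = clean_duplicate_content_py_alt code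
instance (code : String) (out : String) : Decidable (Spec_clean_duplicate_content_py code out) := by unfold Spec_clean_duplicate_content_py; infer_instance

-- ===== CLAIM (what is proved, stated in full; the proofs are below) =====
def Claim_equal_clean_duplicate_content_py : Prop := ∀ (code : String), Dom_clean_duplicate_content_py code → Spec_clean_duplicate_content_py code (clean_duplicate_content_py code)

-- ===== LEMMAS AND PROOFS =====

-- a 'def '-line strips to a nonempty string
theorem cdc_strip_ne_of_def (l : String)
    (h : PySem.Str.startswith l "def " = true) : PySem.Str.strip l ≠ "" := by
  intro hstrip
  have hpre : ("def ".toList) <+: l.toList := by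
    have := (PySem.Chars.startswith_iff l.toList "def ".toList).1 h
    exact this
  obtain ⟨t, ht⟩ := hpre
  have htoList : PySem.Chars.strip l.toList = [] := by
    have := congrArg String.toList hstrip
    simpa [PySem.Str.strip] using this
  have hshape : l.toList = 'd' :: 'e' :: 'f' :: ' ' :: t := by
    simpa using ht.symm
  rw [hshape] at htoList
  have hl : PySem.Chars.lstrip ('d' :: 'e' :: 'f' :: ' ' :: t) =
      'd' :: 'e' :: 'f' :: ' ' :: t := by
    simp [PySem.Chars.lstrip, PySem.Chars.isspace]
  rw [PySem.Chars.strip, hl, PySem.Chars.rstrip] at htoList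
  have hrev : List.dropWhile PySem.Chars.isspace
      (('d' :: 'e' :: 'f' :: ' ' :: t).reverse) = [] := by
    simpa using congrArg List.reverse htoList
  have hall := List.dropWhile_eq_nil_iff.1 hrev 'd' (by simp)
  simp [PySem.Chars.isspace] at hall

-- A's step = reset on a 'def ' line, else B's inner step
theorem cdcStepA_eq (st : List String × PySem.Set String) (l : String) :
    cdcStepA st l =
      if PySem.Str.startswith l "def " then
        (st.1 ++ [l], PySem.Set.add PySem.Set.empty (PySem.Str.strip l))
      else cdcStepInner st l := by
  by_cases hd : PySem.Str.startswith l "def " = true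
  · have hne := cdc_strip_ne_of_def l hd
    simp at hd
    simp [cdcStepA, hd, hne]
  · simp only [Bool.not_eq_true] at hd
    simp at hd
    by_cases he : PySem.Str.strip l = "" <;>
      simp [cdcStepA, cdcStepInner, hd, he]

-- proof-side sequential form of B: process lines given the current block's inner state
def cdcC (st : List String × PySem.Set String) : List String → List String
  | [] => st.1
  | l :: ls =>
    if PySem.Str.startswith l "def " then
      cdcC (st.1 ++ [l], PySem.Set.add PySem.Set.empty (PySem.Str.strip l)) ls
    else cdcC (cdcStepInner st l) ls

theorem cdc_foldA_eq_C (ls : List String) :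
    ∀ st, (List.foldl cdcStepA st ls).1 = cdcC st ls := by
  induction ls with
  | nil => intro st; rfl
  | cons l ls ih =>
    intro st
    rw [List.foldl_cons, cdcStepA_eq, ih, apply_ite (fun s => cdcC s ls)]
    simp only [cdcC]

-- the inner state of B's processing of a (partial) block
def cdcBState (o : List String) (cur : List String) : List String × PySem.Set String :=
  match cur with
  | [] => (o, PySem.Set.empty)
  | b0 :: rest =>
    if PySem.Str.startswith b0 "def " then
      List.foldl cdcStepInner (o ++ [b0], PySem.Set.ofList [PySem.Str.strip b0]) rest
    else List.foldl cdcStepInner (o, PySem.Set.empty) (b0 :: rest)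

theorem cdcProcessBlock_eq (o b : List String) :
    cdcProcessBlock o b = (cdcBState o b).1 := by
  cases b with
  | nil => rfl
  | cons b0 rest =>
    simp only [cdcProcessBlock, cdcBState]
    split <;> rfl

theorem cdcBState_snoc (o cur : List String) (l : String)
    (h : PySem.Str.startswith l "def " = false) :
    cdcBState o (cur ++ [l]) = cdcStepInner (cdcBState o cur) l := by
  cases cur with
  | nil =>
    simp at h
    simp [cdcBState, h]
  | cons b0 rest =>
    rw [List.cons_append]
    simp only [cdcBState]
    split <;> simp only [List.foldl_append, List.foldl_cons, List.foldl_nil]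

theorem cdcBState_def (o : List String) (l : String)
    (h : PySem.Str.startswith l "def " = true) :
    cdcBState o [l] = (o ++ [l], PySem.Set.add PySem.Set.empty (PySem.Str.strip l)) := by
  simp only [cdcBState]
  rw [if_pos h]
  simp only [List.foldl_nil, PySem.Set.ofList, List.foldl_cons]

-- the block accumulator of the split fold is prefix-invariant
theorem cdcSplit_prefix (ls : List String) :
    ∀ bs cur, List.foldl cdcSplitStep (bs, cur) ls =
      (bs ++ (List.foldl cdcSplitStep ([], cur) ls).1,
       (List.foldl cdcSplitStep ([], cur) ls).2) := by
  induction ls with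
  | nil => intro bs cur; simp
  | cons l ls ih =>
    intro bs cur
    by_cases hd : PySem.Str.startswith l "def " = true
    · rw [List.foldl_cons, List.foldl_cons]
      simp only [cdcSplitStep, hd, if_true]
      rw [ih (bs ++ [cur]) [l], ih ([] ++ [cur]) [l]]
      simp
    · rw [List.foldl_cons, List.foldl_cons]
      simp only [cdcSplitStep, hd, if_false, Bool.false_eq_true]
      exact ih bs (cur ++ [l])

-- main invariant: A's sequential pass from a mid-block state = B's remaining blocks
theorem cdc_main (ls : List String) :
    ∀ cur o, cdcC (cdcBState o cur) ls =
      List.foldl cdcProcessBlock o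
        ((List.foldl cdcSplitStep ([], cur) ls).1 ++
         [(List.foldl cdcSplitStep ([], cur) ls).2]) := by
  induction ls with
  | nil =>
    intro cur o
    simp [cdcC, cdcProcessBlock_eq]
  | cons l ls ih =>
    intro cur o
    by_cases hd : PySem.Str.startswith l "def " = true
    · rw [List.foldl_cons]
      simp only [cdcSplitStep, hd, if_true]
      rw [cdcSplit_prefix ls ([] ++ [cur]) [l]]
      simp only [List.nil_append]
      have hrw : ([cur] ++ (List.foldl cdcSplitStep ([], [l]) ls).1) ++
          [(List.foldl cdcSplitStep ([], [l]) ls).2] =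
          cur :: ((List.foldl cdcSplitStep ([], [l]) ls).1 ++
            [(List.foldl cdcSplitStep ([], [l]) ls).2]) := by simp
      rw [hrw, List.foldl_cons, cdcProcessBlock_eq, ← ih [l] ((cdcBState o cur).1)]
      rw [cdcBState_def _ _ hd]
      simp only [cdcC]
      rw [if_pos hd]
    · simp only [Bool.not_eq_true] at hd
      rw [List.foldl_cons]
      simp only [cdcSplitStep, hd, if_false, Bool.false_eq_true]
      rw [← ih (cur ++ [l]) o, cdcBState_snoc o cur l hd]
      simp only [cdcC, hd, Bool.false_eq_true, if_false]

theorem cdc_eq (code : String) :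
    clean_duplicate_content_py code = clean_duplicate_content_py_alt code := by
  unfold clean_duplicate_content_py clean_duplicate_content_py_alt
  have h0 : (([], PySem.Set.empty) : List String × PySem.Set String) =
      cdcBState [] [] := rfl
  rw [cdc_foldA_eq_C, h0, cdc_main]

-- ===== VERDICT (by name: the statement is the Claim_ definition above) =====
theorem clean_duplicate_content_py_spec : Claim_equal_clean_duplicate_content_py := by
  intro code _
  unfold Spec_clean_duplicate_content_py
  exact cdc_eq code
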